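-- pv_equiv track=rewrite | github.com/implse/Code_Challenges | Dropbox/incorrectPasscodeAttempts.py | incorrectPasscodeAttempts
-- ===== SOURCE A (Python) =====
-- def incorrectPasscodeAttempts(passcode, attempts):
--     count_wrong_attempt = 0
--     for attempt in attempts:
--         if attempt == passcode:
--             count_wrong_attempt = 0
--         else:
--             count_wrong_attempt += 1
--             if count_wrong_attempt == 10:
--                 return True
--     return False
-- ===== SOURCE B (Python) =====
-- def incorrectPasscodeAttempts(passcode, attempts):
--     return any(all(a != passcode for a in attempts[i:i + 10])
--                for i in range(len(attempts) - 9))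
-- ===== Notes on version B (the rewrite author's own statement) =====
-- stated objective: alternative
-- what changed: B checks whether any length-10 sliding window of attempts is entirely wrong, instead of threading a reset-on-match counter through one flat loop with an early return.
import Mathlib
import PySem

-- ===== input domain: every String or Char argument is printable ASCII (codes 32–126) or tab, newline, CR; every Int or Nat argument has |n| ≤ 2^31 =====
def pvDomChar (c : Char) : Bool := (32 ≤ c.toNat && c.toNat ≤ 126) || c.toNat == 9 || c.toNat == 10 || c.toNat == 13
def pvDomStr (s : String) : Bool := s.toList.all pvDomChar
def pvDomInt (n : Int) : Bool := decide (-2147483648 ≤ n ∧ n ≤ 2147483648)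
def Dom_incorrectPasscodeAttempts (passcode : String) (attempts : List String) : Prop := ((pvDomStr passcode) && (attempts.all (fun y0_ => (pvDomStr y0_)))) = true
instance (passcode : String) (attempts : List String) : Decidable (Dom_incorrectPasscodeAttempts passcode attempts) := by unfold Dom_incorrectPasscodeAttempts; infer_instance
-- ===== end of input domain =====

-- B replaces A's reset-on-match counter loop by a sliding-window check (any length-10 window all wrong); alternative decomposition, same cost.

-- ===== PORT A =====
-- the for-loop of A, with the running counter as the extra argument; early 'return True' = result true
def pvGoA (passcode : String) : List String → Int → Bool
  | [], _ => false
  | attempt :: rest, count_wrong_attempt =>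
    if attempt == passcode then pvGoA passcode rest 0
    else if count_wrong_attempt + 1 == 10 then true
    else pvGoA passcode rest (count_wrong_attempt + 1)

def incorrectPasscodeAttempts (passcode : String) (attempts : List String) : Bool :=
  pvGoA passcode attempts 0

-- ===== PORT B =====
-- any(all(a != passcode for a in attempts[i:i+10]) for i in range(len(attempts) - 9))
def incorrectPasscodeAttempts_alt (passcode : String) (attempts : List String) : Bool :=
  (PySem.List.pyRange 0 ((attempts.length : Int) - 9) 1).any
    (fun i => (PySem.List.slice attempts (some i) (some (i + 10))).all (fun a => a != passcode))

-- ===== PRECONDITION & SPEC =====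
def Spec_incorrectPasscodeAttempts (passcode : String) (attempts : List String) (out : Bool) : Prop := out = incorrectPasscodeAttempts_alt passcode attempts
instance (passcode : String) (attempts : List String) (out : Bool) : Decidable (Spec_incorrectPasscodeAttempts passcode attempts out) := by unfold Spec_incorrectPasscodeAttempts; infer_instance

-- ===== CLAIM (what is proved, stated in full; the proofs are below) =====
def Claim_equal_incorrectPasscodeAttempts : Prop := ∀ (passcode : String) (attempts : List String), Dom_incorrectPasscodeAttempts passcode attempts → Spec_incorrectPasscodeAttempts passcode attempts (incorrectPasscodeAttempts passcode attempts)

-- ===== LEMMAS AND PROOFS =====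

-- "some suffix starts with 10 consecutive wrong attempts" — the common characterisation
def pvHasRun (passcode : String) : List String → Bool
  | [] => false
  | a :: rest =>
    decide (10 ≤ (((a :: rest)).takeWhile (fun x => x != passcode)).length) || pvHasRun passcode rest

theorem pv_take_all_iff {α : Type} (p : α → Bool) (xs : List α) (k : Nat) :
    k ≤ (xs.takeWhile p).length ↔ ((xs.take k).all p = true ∧ k ≤ xs.length) := by
  induction xs generalizing k with
  | nil => cases k <;> simp
  | cons a t ih =>
    cases k with
    | zero => simp
    | succ m =>
      by_cases hp : p a = true
      · simp [hp, ih m]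
      · simp [hp]

theorem pvHasRun_of_run (passcode : String) (l : List String)
    (h : 10 ≤ (l.takeWhile (fun x => x != passcode)).length) : pvHasRun passcode l = true := by
  cases l with
  | nil => simp at h
  | cons a t => simp [pvHasRun, h]

theorem pvGoA_eq (passcode : String) (l : List String) (c : Int) (h0 : 0 ≤ c) (h9 : c ≤ 9) :
    pvGoA passcode l c =
      (decide (10 ≤ (l.takeWhile (fun x => x != passcode)).length + c.toNat)
        || pvHasRun passcode l) := by
  induction l generalizing c with
  | nil => simp [pvGoA, pvHasRun]; omega
  | cons a t ih =>
    by_cases hp : (a == passcode) = true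
    · have hw : (a != passcode) = false := by simp [bne, hp]
      have hrec := ih 0 (by omega) (by omega)
      have hz : List.takeWhile (fun x => x != passcode) (a :: t) = [] := by
        simp [hw]
      by_cases hR : 10 ≤ (t.takeWhile (fun x => x != passcode)).length
      · have hHR := pvHasRun_of_run passcode t hR
        simp [pvGoA, hp, pvHasRun, hrec, hz, hR, hHR]
      · simp [pvGoA, hp, pvHasRun, hrec, hz, hR]
        intro h; omega
    · have hw : (a != passcode) = true := by simp [bne, hp]
      by_cases hc : (c + 1 == 10) = true
      · have hc9 : c = 9 := by simp at hc; omega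
        subst hc9
        simp [pvGoA, hp, hw, pvHasRun]
      · have hrec := ih (c + 1) (by simp at hc; omega) (by simp at hc; omega)
        have hcons : List.takeWhile (fun x => x != passcode) (a :: t) =
            a :: t.takeWhile (fun x => x != passcode) := by
          simp [hw]
        by_cases hR : 9 ≤ (t.takeWhile (fun x => x != passcode)).length
        · have hP1 : 10 ≤ (t.takeWhile (fun x => x != passcode)).length + (c+1).toNat := by omega
          have hP2 : 10 ≤ (t.takeWhile (fun x => x != passcode)).length + 1 + c.toNat := by omega
          simp [pvGoA, hp, hc, pvHasRun, hrec, hcons, hP1, hP2, hR]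
        · have hiff : (10 ≤ (t.takeWhile (fun x => x != passcode)).length + (c+1).toNat) ↔
              (10 ≤ (t.takeWhile (fun x => x != passcode)).length + 1 + c.toNat) := by omega
          simp [pvGoA, hp, hc, pvHasRun, hrec, hcons, hR, hiff]

theorem pvHasRun_iff (passcode : String) (l : List String) :
    pvHasRun passcode l = true ↔
      ∃ k : Nat, 10 ≤ ((l.drop k).takeWhile (fun x => x != passcode)).length := by
  induction l with
  | nil => simp [pvHasRun]
  | cons a t ih =>
    simp only [pvHasRun, Bool.or_eq_true, decide_eq_true_eq, ih]
    constructor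
    · rintro (h | ⟨k, hk⟩)
      · exact ⟨0, by simpa using h⟩
      · exact ⟨k + 1, by simpa using hk⟩
    · rintro ⟨k, hk⟩
      cases k with
      | zero => left; simpa using hk
      | succ m => right; exact ⟨m, by simpa using hk⟩

theorem pvAlt_iff (passcode : String) (l : List String) :
    incorrectPasscodeAttempts_alt passcode l = true ↔
      ∃ k : Nat, 10 ≤ ((l.drop k).takeWhile (fun x => x != passcode)).length := by
  unfold incorrectPasscodeAttempts_alt
  rw [List.any_eq_true]
  constructor
  · rintro ⟨i, hi, hall⟩
    rw [PySem.List.mem_pyRange_one] at hi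
    obtain ⟨h0, hlt⟩ := hi
    obtain ⟨k, rfl⟩ : ∃ k : Nat, i = (k : Int) := ⟨i.toNat, (Int.toNat_of_nonneg h0).symm⟩
    refine ⟨k, ?_⟩
    rw [show ((k : Int) + 10) = ((k + 10 : Nat) : Int) by push_cast; ring] at hall
    rw [PySem.List.slice_natCast] at hall
    have hlen : 10 ≤ (l.drop k).length := by
      simp only [List.length_drop]; omega
    exact (pv_take_all_iff _ _ 10).mpr ⟨by simpa using hall, hlen⟩
  · rintro ⟨k, hk⟩
    have h := (pv_take_all_iff (fun x => x != passcode) (l.drop k) 10).mp hk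
    obtain ⟨hall, hlen⟩ := h
    simp only [List.length_drop] at hlen
    refine ⟨(k : Int), ?_, ?_⟩
    · rw [PySem.List.mem_pyRange_one]
      constructor
      · exact Int.natCast_nonneg k
      · omega
    · rw [show ((k : Int) + 10) = ((k + 10 : Nat) : Int) by push_cast; ring,
        PySem.List.slice_natCast]
      simpa using hall

-- ===== VERDICT (by name: the statement is the Claim_ definition above) =====
theorem incorrectPasscodeAttempts_spec : Claim_equal_incorrectPasscodeAttempts := by
  intro passcode attempts _
  unfold Spec_incorrectPasscodeAttempts incorrectPasscodeAttempts
  rw [pvGoA_eq passcode attempts 0 (by omega) (by omega)]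
  have hA : (decide (10 ≤ (attempts.takeWhile (fun x => x != passcode)).length + (0:Int).toNat)
      || pvHasRun passcode attempts) = pvHasRun passcode attempts := by
    by_cases h : 10 ≤ (attempts.takeWhile (fun x => x != passcode)).length
    · simp [h, pvHasRun_of_run passcode attempts h]
    · simp [h]
  rw [hA, Bool.eq_iff_iff, pvHasRun_iff, pvAlt_iff]
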